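-- pv_equiv track=rewrite | github.com/Linzertorte/SRM | 628Div2/BracketExpressions.py | ifPossible
-- ===== SOURCE A (Python) =====
-- from collections import deque
--
-- def ifPossible(expression):
--
--     def is_valid(s):
--         n = len(s)
--         stack = deque()
--         for i in s:
--             if i==']':
--                 if not stack or stack[0]!='[':
--                     return False
--                 stack.popleft()
--             elif i==')':
--                 if not stack or stack[0]!='(':
--                     return False
--                 stack.popleft()
--             elif i=='}':
--                 if not stack or stack[0]!='{':
--                     return False
--                 stack.popleft()
--             else:
--                 stack.appendleft(i)
--         return len(stack)==0
--
--
--     def dfs(i,e,expression):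
--         if i == len(expression):
--             if is_valid(e):
--                 return True
--             else:
--                 return False
--         if expression[i]!='X':
--             return dfs(i+1,e+expression[i],expression)
--         else:
--             for c in ['(',')','[',']','{','}']:
--                 if dfs(i+1,e+c,expression):
--                     return True
--             return False
--
--     result = dfs(0,"",expression)
--     if result:
--         return "possible"
--     else:
--         return "impossible"
-- ===== SOURCE B (Python) =====
-- def ifPossible(expression):
--     s = expression
--     n = len(s)
--
--     # a character that can never take part in any bracket pair makes it impossible
--     if any(c not in "()[]{}X" for c in s):
--         return "impossible"
--
--     def m(a, b):
--         return any((a == o or a == 'X') and (b == c or b == 'X')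
--                    for o, c in (('(', ')'), ('[', ']'), ('{', '}')))
--
--     # good holds exactly the index pairs (i, j) such that s[i:j] can be
--     # completed to a balanced bracket string.
--     good = {(i, i) for i in range(n + 1)}
--     for L in range(2, n + 1):
--         for i in range(n - L + 1):
--             j = i + L
--             if any(m(s[i], s[k - 1]) and (i + 1, k - 1) in good and (k, j) in good
--                    for k in range(i + 2, j + 1)):
--                 good.add((i, j))
--     return "possible" if (0, n) in good else "impossible"
-- ===== Notes on version B (the rewrite author's own statement) =====
-- stated objective: faster
-- what changed: Replaces the exhaustive DFS that tries all 6^k substitutions of the X's and checks each candidate with a stack by an O(n) pre-filter (any character outside ()[]{}X makes it impossible) followed by a bottom-up interval dynamic programme recording which substrings s[i:j] can be completed to a balanced string, treating X as a wildcard in the bracket-matching test.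
import Mathlib
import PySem

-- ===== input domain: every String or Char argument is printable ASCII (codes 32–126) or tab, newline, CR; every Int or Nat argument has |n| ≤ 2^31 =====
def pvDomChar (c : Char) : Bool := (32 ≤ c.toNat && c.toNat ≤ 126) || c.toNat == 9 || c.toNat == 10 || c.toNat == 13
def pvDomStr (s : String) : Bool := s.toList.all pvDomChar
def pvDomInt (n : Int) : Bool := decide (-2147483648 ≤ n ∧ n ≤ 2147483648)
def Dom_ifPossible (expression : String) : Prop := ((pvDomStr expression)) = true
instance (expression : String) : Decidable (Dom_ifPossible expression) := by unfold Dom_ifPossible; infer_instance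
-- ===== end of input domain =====

-- B replaces A's exhaustive 6^k DFS over the X-substitutions by a bottom-up interval DP
-- over substrings with X as a wildcard (objective: faster, asymptotically).

-- ===== PORT A =====
-- is_valid's loop: the deque is used as a stack at its left end (appendleft / stack[0] / popleft),
-- ported as a List with the top at the head.
def isValidGoA : List Char → List Char → Bool
  | stack, [] => stack.length == 0
  | stack, i :: rest =>
    if i = ']' then
      match stack with
      | [] => false
      | c :: st => if c ≠ '[' then false else isValidGoA st rest
    else if i = ')' then
      match stack with
      | [] => false
      | c :: st => if c ≠ '(' then false else isValidGoA st rest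
    else if i = '}' then
      match stack with
      | [] => false
      | c :: st => if c ≠ '{' then false else isValidGoA st rest
    else isValidGoA (i :: stack) rest

def isValidA (s : List Char) : Bool := isValidGoA [] s

-- dfs(i, e, expression): the index i is ported as the remaining suffix expression[i:].
def dfsA : List Char → List Char → Bool
  | [], e => isValidA e
  | c :: rest, e =>
    if c ≠ 'X' then dfsA rest (e ++ [c])
    else ['(', ')', '[', ']', '{', '}'].any (fun b => dfsA rest (e ++ [b]))

def ifPossible (expression : String) : String :=
  if dfsA expression.toList [] then "possible" else "impossible"

-- ===== PORT B =====
def matchB (a b : Char) : Bool :=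
  [('(', ')'), ('[', ']'), ('{', '}')].any
    (fun p => (a == p.1 || a == 'X') && (b == p.2 || b == 'X'))

-- body of the inner 'for i' loop (indices fed to s are always in range, so pyGetD is exact)
def stepB (s : List Char) (L : Int) (g : PySem.Set (Int × Int)) (i : Int) : PySem.Set (Int × Int) :=
  let j := i + L
  if (PySem.List.pyRange (i + 2) (j + 1) 1).any (fun k =>
       matchB (PySem.List.pyGetD s i ' ') (PySem.List.pyGetD s (k - 1) ' ') &&
       PySem.Set.contains g (i + 1, k - 1) && PySem.Set.contains g (k, j))
  then PySem.Set.add g (i, j) else g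

-- body of the outer 'for L' loop
def lenB (s : List Char) (n : Int) (g : PySem.Set (Int × Int)) (L : Int) : PySem.Set (Int × Int) :=
  (PySem.List.pyRange 0 (n - L + 1) 1).foldl (stepB s L) g

def ifPossible_alt (expression : String) : String :=
  let s := expression.toList
  let n : Int := s.length
  -- a character that can never take part in any bracket pair makes it impossible
  if s.any (fun c => !(['(', ')', '[', ']', '{', '}', 'X'].contains c)) then "impossible"
  else
    let good0 : PySem.Set (Int × Int) :=
      PySem.Set.ofList ((PySem.List.pyRange 0 (n + 1) 1).map (fun i => (i, i)))
    let good := (PySem.List.pyRange 2 (n + 1) 1).foldl (lenB s n) good0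
    if PySem.Set.contains good (0, n) then "possible" else "impossible"

-- ===== PRECONDITION & SPEC =====
def Spec_ifPossible (expression : String) (out : String) : Prop := out = ifPossible_alt expression
instance (expression : String) (out : String) : Decidable (Spec_ifPossible expression out) := by unfold Spec_ifPossible; infer_instance

-- ===== CLAIM (what is proved, stated in full; the proofs are below) =====
def Claim_equal_ifPossible : Prop := ∀ (expression : String), Dom_ifPossible expression → Spec_ifPossible expression (ifPossible expression)

-- ===== LEMMAS AND PROOFS =====

-- ---- proof-side machinery: an Option-valued stack machine mirroring is_valid's loop ----
def runSt : List Char → List Char → Option (List Char)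
  | stack, [] => some stack
  | stack, i :: rest =>
    if i = ']' then
      match stack with
      | [] => none
      | c :: st => if c ≠ '[' then none else runSt st rest
    else if i = ')' then
      match stack with
      | [] => none
      | c :: st => if c ≠ '(' then none else runSt st rest
    else if i = '}' then
      match stack with
      | [] => none
      | c :: st => if c ≠ '{' then none else runSt st rest
    else runSt (i :: stack) rest

def isCloserB (c : Char) : Bool := c == ']' || c == ')' || c == '}'

def pairOKB (o c : Char) : Bool :=
  (o == '(' && c == ')') || (o == '[' && c == ']') || (o == '{' && c == '}')

-- which strings the X's may be replaced with
inductive Choice : List Char → List Char → Prop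
  | nil : Choice [] []
  | keep {c : Char} {s w : List Char} : c ≠ 'X' → Choice s w → Choice (c :: s) (c :: w)
  | wild {c : Char} {s w : List Char} : c ∈ ['(', ')', '[', ']', '{', '}'] → Choice s w →
      Choice ('X' :: s) (c :: w)

-- wildcard interval-balance spec (top-down form of B's DP)
def CanX : List Char → Bool
  | [] => true
  | a :: t =>
    (List.range t.length).any (fun k =>
      matchB a (t.getD k ' ') && CanX (t.take k) && CanX (t.drop (k + 1)))
termination_by l => l.length
decreasing_by
  all_goals simp
  all_goals omega

def Seg (s : List Char) (a b : Nat) : List Char := (s.drop a).take (b - a)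

def GoodSpec (s : List Char) (B : Nat) (p : Int × Int) : Prop :=
  ∃ i j : Nat, p = ((i : Int), (j : Int)) ∧ i ≤ j ∧ j ≤ s.length ∧ j - i ≤ B ∧
    CanX (Seg s i j) = true

def MidSpec (s : List Char) (L : Nat) (i0 : Nat) (p : Int × Int) : Prop :=
  GoodSpec s (L - 1) p ∨
  ∃ i : Nat, i < i0 ∧ i + L ≤ s.length ∧ p = ((i : Int), ((i + L : Nat) : Int)) ∧
    CanX (Seg s i (i + L)) = true

-- ---- stack-machine lemmas ----
theorem runSt_cons_open {i : Char} (h : isCloserB i = false) (st rest : List Char) :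
    runSt st (i :: rest) = runSt (i :: st) rest := by
  simp [isCloserB] at h
  obtain ⟨⟨h1, h2⟩, h3⟩ := h
  simp [runSt, h1, h2, h3]

theorem runSt_cons_close_nil {i : Char} (h : isCloserB i = true) (rest : List Char) :
    runSt [] (i :: rest) = none := by
  simp [isCloserB] at h
  rcases h with (h | h) | h <;> subst h <;> simp [runSt]

theorem runSt_cons_close_cons {c : Char} (h : isCloserB c = true) (o : Char)
    (st rest : List Char) :
    runSt (o :: st) (c :: rest) = if pairOKB o c then runSt st rest else none := by
  simp [isCloserB] at h
  rcases h with (h | h) | h <;> subst h <;>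
    simp [runSt, pairOKB] <;> by_cases ho : o = '[' <;> by_cases ho2 : o = '(' <;>
      by_cases ho3 : o = '{' <;> simp_all

theorem pairOKB_cases {o c : Char} (h : pairOKB o c = true) :
    (o = '(' ∧ c = ')') ∨ (o = '[' ∧ c = ']') ∨ (o = '{' ∧ c = '}') := by
  simp [pairOKB] at h; tauto

theorem isValidGo_eq_run : ∀ (s st : List Char),
    (isValidGoA st s = true ↔ runSt st s = some []) := by
  intro s
  induction s with
  | nil => intro st; cases st <;> simp [isValidGoA, runSt]
  | cons i rest ih =>
    intro st
    by_cases h1 : i = ']' <;> by_cases h2 : i = ')' <;> by_cases h3 : i = '}' <;>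
      first
      | (subst_vars; cases st with
          | nil => simp [isValidGoA, runSt]
          | cons c st' =>
            simp only [isValidGoA, runSt, if_pos rfl]
            split <;> simp [ih])
      | (cases st with
          | nil => simp [isValidGoA, runSt, h1, h2, h3, ih]
          | cons c st' => simp [isValidGoA, runSt, h1, h2, h3, ih])

theorem runSt_append : ∀ (u v st : List Char),
    runSt st (u ++ v) = (runSt st u).bind (fun st' => runSt st' v) := by
  intro u
  induction u with
  | nil => intro v st; simp [runSt]
  | cons i u' ih =>
    intro v st
    by_cases hc : isCloserB i = true
    · cases st with
      | nil => simp [runSt_cons_close_nil hc]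
      | cons o st' =>
        rw [List.cons_append, runSt_cons_close_cons hc, runSt_cons_close_cons hc]
        split <;> simp [ih]
    · rw [List.cons_append, runSt_cons_open (by simpa using hc),
        runSt_cons_open (by simpa using hc), ih]

theorem runSt_frame : ∀ (u st t r : List Char),
    runSt st u = some t → runSt (st ++ r) u = some (t ++ r) := by
  intro u
  induction u with
  | nil => intro st t r h; simp [runSt] at h ⊢; subst h; rfl
  | cons i u' ih =>
    intro st t r h
    by_cases hc : isCloserB i = true
    · cases st with
      | nil => rw [runSt_cons_close_nil hc] at h; exact absurd h (by simp)
      | cons o st' =>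
        rw [runSt_cons_close_cons hc] at h
        rw [List.cons_append, runSt_cons_close_cons hc]
        split at h
        · rw [if_pos (by assumption)]; exact ih _ _ _ h
        · exact absurd h (by simp)
    · rw [runSt_cons_open (by simpa using hc)] at h
      rw [runSt_cons_open (by simpa using hc)]
      exact ih _ _ _ h

theorem closer_of_pair {o c : Char} (h : pairOKB o c = true) : isCloserB c = true := by
  rcases pairOKB_cases h with ⟨_, rfl⟩ | ⟨_, rfl⟩ | ⟨_, rfl⟩ <;> decide

theorem opener_of_pair {o c : Char} (h : pairOKB o c = true) : isCloserB o = false := by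
  rcases pairOKB_cases h with ⟨rfl, _⟩ | ⟨rfl, _⟩ | ⟨rfl, _⟩ <;> decide

theorem opener_mem_six {o c : Char} (h : pairOKB o c = true) :
    o ∈ ['(', ')', '[', ']', '{', '}'] := by
  rcases pairOKB_cases h with ⟨rfl, _⟩ | ⟨rfl, _⟩ | ⟨rfl, _⟩ <;> decide

theorem closer_mem_six {o c : Char} (h : pairOKB o c = true) :
    c ∈ ['(', ')', '[', ']', '{', '}'] := by
  rcases pairOKB_cases h with ⟨_, rfl⟩ | ⟨_, rfl⟩ | ⟨_, rfl⟩ <;> decide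

theorem matchB_cases {a b : Char} (h : matchB a b = true) :
    ∃ o c, pairOKB o c = true ∧ (a = o ∨ a = 'X') ∧ (b = c ∨ b = 'X') := by
  simp [matchB] at h
  rcases h with ⟨ha, hb⟩ | ⟨ha, hb⟩ | ⟨ha, hb⟩
  · exact ⟨'(', ')', by decide, ha, hb⟩
  · exact ⟨'[', ']', by decide, ha, hb⟩
  · exact ⟨'{', '}', by decide, ha, hb⟩

theorem matchB_intro {o c a b : Char} (hp : pairOKB o c = true)
    (ha : a = o ∨ a = 'X') (hb : b = c ∨ b = 'X') : matchB a b = true := by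
  rcases pairOKB_cases hp with ⟨rfl, rfl⟩ | ⟨rfl, rfl⟩ | ⟨rfl, rfl⟩ <;>
    simp [matchB] <;> tauto

theorem pop_aux : ∀ (N : Nat) (w : List Char), w.length ≤ N → ∀ (a : Char) (st : List Char),
    runSt (a :: st) w = some [] →
    ∃ u b v, w = u ++ b :: v ∧ runSt [] u = some [] ∧ pairOKB a b = true ∧
      runSt st v = some [] := by
  intro N
  induction N with
  | zero =>
    intro w hw a st h
    have hnil : w = [] := by cases w <;> simp_all
    subst hnil
    simp [runSt] at h
  | succ N ih =>
    intro w hw a st h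
    cases w with
    | nil => simp [runSt] at h
    | cons c w' =>
      by_cases hc : isCloserB c = true
      · rw [runSt_cons_close_cons hc] at h
        split at h
        · exact ⟨[], c, w', rfl, rfl, by assumption, h⟩
        · simp at h
      · rw [runSt_cons_open (by simpa using hc)] at h
        have hw' : w'.length ≤ N := by simp at hw; omega
        obtain ⟨u1, b1, v1, rfl, hu1, hp1, hv1⟩ := ih w' hw' c (a :: st) h
        have hv1len : v1.length ≤ N := by simp at hw'; omega
        obtain ⟨u2, b2, v2, rfl, hu2, hp2, hv2⟩ := ih v1 hv1len a st hv1
        refine ⟨c :: u1 ++ b1 :: u2, b2, v2, by simp, ?_, hp2, hv2⟩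
        rw [show (c :: u1 ++ b1 :: u2) = c :: (u1 ++ b1 :: u2) from rfl,
          runSt_cons_open (by simpa using hc), runSt_append]
        have h1 : runSt [c] u1 = some [c] := by
          simpa using runSt_frame u1 [] [] [c] hu1
        rw [h1]
        show runSt [c] (b1 :: u2) = some []
        rw [runSt_cons_close_cons (closer_of_pair hp1), if_pos hp1]
        exact hu2

theorem choice_nil_iff (w : List Char) : Choice [] w ↔ w = [] := by
  constructor
  · intro h; cases h; rfl
  · rintro rfl; exact Choice.nil

theorem choice_cons_inv {a : Char} {s w : List Char} (h : Choice (a :: s) w) :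
    ∃ b w', w = b :: w' ∧ (b = a ∨ (a = 'X' ∧ b ∈ ['(', ')', '[', ']', '{', '}'])) ∧
      Choice s w' := by
  cases h with
  | keep hne h' => exact ⟨_, _, rfl, Or.inl rfl, h'⟩
  | wild hmem h' => exact ⟨_, _, rfl, Or.inr ⟨rfl, hmem⟩, h'⟩

theorem choice_head {a o : Char} (h : a = o ∨ a = 'X')
    (ho : o ∈ ['(', ')', '[', ']', '{', '}']) {s w : List Char} (hc : Choice s w) :
    Choice (a :: s) (o :: w) := by
  by_cases hX : a = 'X'
  · subst hX; exact Choice.wild ho hc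
  · rcases h with rfl | h
    · exact Choice.keep hX hc
    · exact absurd h hX

theorem choice_append {u wu v wv : List Char} (h1 : Choice u wu) (h2 : Choice v wv) :
    Choice (u ++ v) (wu ++ wv) := by
  induction h1 with
  | nil => simpa
  | keep hne _ ih => exact Choice.keep hne ih
  | wild hmem _ ih => exact Choice.wild hmem ih

theorem choice_split : ∀ (x y t : List Char), Choice t (x ++ y) →
    ∃ t1 t2, t = t1 ++ t2 ∧ t1.length = x.length ∧ Choice t1 x ∧ Choice t2 y := by
  intro x
  induction x with
  | nil => intro y t h; exact ⟨[], t, rfl, rfl, Choice.nil, by simpa using h⟩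
  | cons b x' ih =>
    intro y t h
    rw [List.cons_append] at h
    cases h with
    | keep hne h' =>
      obtain ⟨t1, t2, rfl, hlen, hc1, hc2⟩ := ih y _ h'
      exact ⟨_ :: t1, t2, rfl, by simp [hlen], Choice.keep hne hc1, hc2⟩
    | wild hmem h' =>
      obtain ⟨t1, t2, rfl, hlen, hc1, hc2⟩ := ih y _ h'
      exact ⟨'X' :: t1, t2, rfl, by simp [hlen], Choice.wild hmem hc1, hc2⟩

theorem dfsA_iff : ∀ (s e : List Char),
    dfsA s e = true ↔ ∃ w, Choice s w ∧ isValidA (e ++ w) = true := by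
  intro s
  induction s with
  | nil => intro e; simp [dfsA, choice_nil_iff]
  | cons c rest ih =>
    intro e
    by_cases hX : c = 'X'
    · subst hX
      simp only [dfsA]
      rw [if_neg (by simp), List.any_eq_true]
      constructor
      · rintro ⟨b, hb, hdfs⟩
        obtain ⟨w', hc, hv⟩ := (ih (e ++ [b])).1 hdfs
        exact ⟨b :: w', Choice.wild hb hc, by simpa using hv⟩
      · rintro ⟨w, hc, hv⟩
        obtain ⟨b, w', rfl, hrel, hc'⟩ := choice_cons_inv hc
        rcases hrel with rfl | ⟨_, hmem⟩
        · cases hc with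
          | keep hne _ => exact absurd rfl hne
          | wild hmem _ => exact absurd hmem (by decide)
        · exact ⟨b, hmem, (ih (e ++ [b])).2 ⟨w', hc', by simpa using hv⟩⟩
    · simp only [dfsA, if_pos hX]
      rw [ih (e ++ [c])]
      constructor
      · rintro ⟨w', hc, hv⟩
        exact ⟨c :: w', Choice.keep hX hc, by simpa using hv⟩
      · rintro ⟨w, hc, hv⟩
        obtain ⟨b, w', rfl, hrel, hc'⟩ := choice_cons_inv hc
        rcases hrel with rfl | ⟨hXX, _⟩
        · exact ⟨w', hc', by simpa using hv⟩
        · exact absurd hXX hX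

theorem CanX_nil : CanX [] = true := by simp [CanX]

theorem CanX_singleton (a : Char) : CanX [a] = false := by simp [CanX]

theorem choice_cons_inv' {s : List Char} {b : Char} {w : List Char} (h : Choice s (b :: w)) :
    ∃ d v, s = d :: v ∧ (d = b ∨ d = 'X') ∧ Choice v w := by
  cases h with
  | keep hne h' => exact ⟨_, _, rfl, Or.inl rfl, h'⟩
  | wild hmem h' => exact ⟨'X', _, rfl, Or.inr rfl, h'⟩

theorem CanX_iff : ∀ (N : Nat) (s : List Char), s.length ≤ N →
    (CanX s = true ↔ ∃ w, Choice s w ∧ runSt [] w = some []) := by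
  intro N
  induction N with
  | zero =>
    intro s hs
    have hnil : s = [] := by cases s <;> simp_all
    subst hnil
    exact iff_of_true CanX_nil ⟨[], Choice.nil, rfl⟩
  | succ N ih =>
    intro s hs
    cases s with
    | nil => exact iff_of_true CanX_nil ⟨[], Choice.nil, rfl⟩
    | cons a t =>
      have hlen : t.length ≤ N := by simp at hs; omega
      constructor
      · intro h
        rw [CanX, List.any_eq_true] at h
        obtain ⟨k, hk, hcond⟩ := h
        rw [List.mem_range] at hk
        simp only [Bool.and_eq_true] at hcond
        obtain ⟨⟨hm, hu⟩, hv⟩ := hcond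
        obtain ⟨wu, hcu, hru⟩ := (ih (t.take k) (by simp; omega)).1 hu
        obtain ⟨wv, hcv, hrv⟩ := (ih (t.drop (k + 1)) (by simp; omega)).1 hv
        obtain ⟨o, c, hp, ha, hb⟩ := matchB_cases hm
        refine ⟨o :: wu ++ c :: wv, ?_, ?_⟩
        · have hsplit : a :: t = a :: (t.take k ++ t.getD k ' ' :: t.drop (k + 1)) := by
            rw [List.getD_eq_getElem _ _ hk, ← List.drop_eq_getElem_cons hk,
              List.take_append_drop]
          rw [hsplit]
          exact choice_head ha (opener_mem_six hp)
            (choice_append hcu (choice_head hb (closer_mem_six hp) hcv))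
        · rw [show (o :: wu ++ c :: wv) = o :: (wu ++ c :: wv) from rfl,
            runSt_cons_open (opener_of_pair hp), runSt_append]
          have h1 : runSt [o] wu = some [o] := by
            simpa using runSt_frame wu [] [] [o] hru
          rw [h1]
          show runSt [o] (c :: wv) = some []
          rw [runSt_cons_close_cons (closer_of_pair hp), if_pos hp]
          exact hrv
      · rintro ⟨w, hcw, hrw⟩
        obtain ⟨b, w', rfl, hrel, hc'⟩ := choice_cons_inv hcw
        have hbop : isCloserB b = false := by
          by_contra hb
          rw [runSt_cons_close_nil (by simpa using hb)] at hrw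
          exact absurd hrw (by simp)
        rw [runSt_cons_open hbop] at hrw
        obtain ⟨wu, c, wv, rfl, hru, hpc, hrv⟩ := pop_aux w'.length w' le_rfl b [] hrw
        obtain ⟨t1, t2, rfl, hlen1, hcu, hc2⟩ := choice_split wu (c :: wv) t hc'
        obtain ⟨d, v, rfl, hrel2, hcv⟩ := choice_cons_inv' hc2
        have hk : t1.length < (t1 ++ d :: v).length := by simp
        rw [CanX, List.any_eq_true]
        refine ⟨t1.length, List.mem_range.mpr hk, ?_⟩
        simp only [Bool.and_eq_true]
        refine ⟨⟨?_, ?_⟩, ?_⟩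
        · have hgd : (t1 ++ d :: v).getD t1.length ' ' = d := by
            simp [List.getD_eq_getElem?_getD, List.getElem?_append_right]
          rw [hgd]
          refine matchB_intro hpc ?_ hrel2
          rcases hrel with rfl | ⟨rfl, _⟩
          · exact Or.inl rfl
          · exact Or.inr rfl
        · rw [List.take_left]
          have : t1.length ≤ N := by simp at hlen; omega
          exact (ih t1 this).2 ⟨wu, hcu, hru⟩
        · have hdrop : (t1 ++ d :: v).drop (t1.length + 1) = v := by
            simp [List.drop_append]
          rw [hdrop]
          have : v.length ≤ N := by simp at hlen; omega
          exact (ih v this).2 ⟨wv, hcv, hrv⟩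

-- ---- Seg lemmas ----
theorem seg_len {s : List Char} {a b : Nat} (hb : b ≤ s.length) (hab : a ≤ b) :
    (Seg s a b).length = b - a := by
  simp [Seg]; omega

theorem seg_self (s : List Char) (a : Nat) : Seg s a a = [] := by simp [Seg]

theorem seg_all (s : List Char) : Seg s 0 s.length = s := by simp [Seg]

theorem seg_getD {s : List Char} {a b k : Nat} (h : a + k < b) (hb : b ≤ s.length) (d : Char) :
    (Seg s a b).getD k d = s.getD (a + k) d := by
  unfold Seg
  rw [List.getD_eq_getElem?_getD, List.getD_eq_getElem?_getD,
    List.getElem?_take_of_lt (by omega), List.getElem?_drop]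

theorem seg_take {s : List Char} {a b k : Nat} (h : a + k ≤ b) :
    (Seg s a b).take k = Seg s a (a + k) := by
  unfold Seg
  rw [List.take_take]
  congr 1
  omega

theorem seg_drop (s : List Char) (a b k : Nat) :
    (Seg s a b).drop k = Seg s (a + k) b := by
  simp [Seg, List.drop_take, List.drop_drop]; congr 1; omega

theorem seg_cons {s : List Char} {a b : Nat} (hab : a < b) (hb : b ≤ s.length) :
    Seg s a b = s.getD a ' ' :: Seg s (a + 1) b := by
  unfold Seg
  rw [List.drop_eq_getElem_cons (by omega), show b - a = (b - (a + 1)) + 1 from by omega,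
    List.take_succ_cons, List.getD_eq_getElem _ _ (by omega)]

-- the DP entry condition, in pure Nat form
theorem CanX_seg_iff {s : List Char} {i L : Nat} (hL : 2 ≤ L) (hiL : i + L ≤ s.length) :
    (CanX (Seg s i (i + L)) = true ↔
      ∃ k : Nat, i + 2 ≤ k ∧ k ≤ i + L ∧ matchB (s.getD i ' ') (s.getD (k - 1) ' ') = true ∧
        CanX (Seg s (i + 1) (k - 1)) = true ∧ CanX (Seg s k (i + L)) = true) := by
  have hlt : i < i + L := by omega
  rw [seg_cons hlt hiL, CanX, List.any_eq_true]
  have htlen : (Seg s (i + 1) (i + L)).length = L - 1 := by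
    rw [seg_len (s := s) (a := i + 1) (b := i + L) hiL (by omega)]
    omega
  constructor
  · rintro ⟨k', hk', hcond⟩
    rw [List.mem_range, htlen] at hk'
    simp only [Bool.and_eq_true] at hcond
    obtain ⟨⟨hm, hu⟩, hv⟩ := hcond
    rw [seg_getD (by omega) hiL] at hm
    rw [seg_take (by omega)] at hu
    rw [seg_drop] at hv
    refine ⟨i + 2 + k', by omega, by omega, ?_, ?_, ?_⟩
    · rw [show i + 2 + k' - 1 = i + 1 + k' from by omega]; exact hm
    · rw [show i + 2 + k' - 1 = i + 1 + k' from by omega]; exact hu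
    · rw [show i + 2 + k' = i + 1 + (k' + 1) from by omega]; exact hv
  · rintro ⟨k, hk1, hk2, hm, hu, hv⟩
    refine ⟨k - i - 2, by rw [List.mem_range, htlen]; omega, ?_⟩
    simp only [Bool.and_eq_true]
    refine ⟨⟨?_, ?_⟩, ?_⟩
    · rw [seg_getD (by omega) hiL, show i + 1 + (k - i - 2) = k - 1 from by omega]
      exact hm
    · rw [seg_take (by omega), show i + 1 + (k - i - 2) = k - 1 from by omega]
      exact hu
    · rw [seg_drop, show i + 1 + (k - i - 2 + 1) = k from by omega]
      exact hv

theorem inner_step {s : List Char} {L i0 : Nat} (hL : 2 ≤ L) (hi : i0 + L ≤ s.length)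
    {g : PySem.Set (Int × Int)} (hg : ∀ p, p ∈ g ↔ MidSpec s L i0 p) :
    ∀ p, p ∈ stepB s (L : Int) g (i0 : Int) ↔ MidSpec s L (i0 + 1) p := by
  have hmem : ∀ (a b : Nat), a ≤ b → b ≤ s.length → b - a < L →
      (((a : Int), (b : Int)) ∈ g ↔ CanX (Seg s a b) = true) := by
    intro a b hab hb hgap
    rw [hg]
    unfold MidSpec GoodSpec
    constructor
    · rintro (⟨i, j, hp, hij, hj, hgap', hcx⟩ | ⟨i, _, _, hp, hcx⟩)
      · simp only [Prod.mk.injEq, Int.natCast_inj] at hp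
        obtain ⟨rfl, rfl⟩ := hp
        exact hcx
      · simp only [Prod.mk.injEq, Int.natCast_inj] at hp
        obtain ⟨rfl, rfl⟩ := hp
        omega
    · intro hcx
      exact Or.inl ⟨a, b, rfl, hab, hb, by omega, hcx⟩
  have hcondIff : ((PySem.List.pyRange ((i0 : Int) + 2) ((i0 : Int) + (L : Int) + 1) 1).any
      (fun k => matchB (PySem.List.pyGetD s (i0 : Int) ' ') (PySem.List.pyGetD s (k - 1) ' ') &&
        PySem.Set.contains g ((i0 : Int) + 1, k - 1) &&
        PySem.Set.contains g (k, (i0 : Int) + (L : Int))) = true)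
      ↔ CanX (Seg s i0 (i0 + L)) = true := by
    rw [List.any_eq_true, CanX_seg_iff hL hi]
    constructor
    · rintro ⟨k, hkmem, hk⟩
      rw [PySem.List.mem_pyRange_one] at hkmem
      obtain ⟨hk1, hk2⟩ := hkmem
      have hk0 : 0 ≤ k := by omega
      have hkcast : ((k.toNat : Nat) : Int) = k := Int.toNat_of_nonneg hk0
      simp only [Bool.and_eq_true] at hk
      obtain ⟨⟨hm, hc1⟩, hc2⟩ := hk
      rw [PySem.List.pyGetD_natCast] at hm
      rw [show (k - 1) = ((k.toNat - 1 : Nat) : Int) from by push_cast; omega,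
        PySem.List.pyGetD_natCast] at hm
      rw [PySem.Set.contains_iff,
        show ((i0 : Int) + 1, k - 1) = (((i0 + 1 : Nat) : Int), ((k.toNat - 1 : Nat) : Int)) from by
          rw [show ((k.toNat - 1 : Nat) : Int) = k - 1 from by omega]; push_cast; rfl] at hc1
      rw [PySem.Set.contains_iff,
        show (k, (i0 : Int) + (L : Int)) = (((k.toNat : Nat) : Int), ((i0 + L : Nat) : Int)) from by
          rw [show ((k.toNat : Nat) : Int) = k from by omega]; push_cast; rfl] at hc2
      refine ⟨k.toNat, by omega, by omega, hm, ?_, ?_⟩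
      · exact (hmem (i0 + 1) (k.toNat - 1) (by omega) (by omega) (by omega)).1 hc1
      · exact (hmem k.toNat (i0 + L) (by omega) (by omega) (by omega)).1 hc2
    · rintro ⟨k, hk1, hk2, hm, hu, hv⟩
      refine ⟨(k : Int), by rw [PySem.List.mem_pyRange_one]; push_cast; omega, ?_⟩
      simp only [Bool.and_eq_true]
      refine ⟨⟨?_, ?_⟩, ?_⟩
      · rw [PySem.List.pyGetD_natCast,
          show ((k : Int) - 1) = ((k - 1 : Nat) : Int) from by push_cast; omega,
          PySem.List.pyGetD_natCast]
        exact hm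
      · rw [PySem.Set.contains_iff,
          show ((i0 : Int) + 1, (k : Int) - 1) = (((i0 + 1 : Nat) : Int), ((k - 1 : Nat) : Int)) from by
            rw [show ((k - 1 : Nat) : Int) = (k : Int) - 1 from by omega]; push_cast; rfl]
        exact (hmem (i0 + 1) (k - 1) (by omega) (by omega) (by omega)).2 hu
      · rw [PySem.Set.contains_iff,
          show ((k : Int), (i0 : Int) + (L : Int)) = (((k : Nat) : Int), ((i0 + L : Nat) : Int)) from by push_cast; rfl]
        exact (hmem k (i0 + L) (by omega) (by omega) (by omega)).2 hv
  intro p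
  simp only [stepB]
  by_cases hcx : CanX (Seg s i0 (i0 + L)) = true
  · rw [if_pos (hcondIff.2 hcx), PySem.Set.mem_add]
    unfold MidSpec
    constructor
    · rintro (hpg | rfl)
      · rcases (hg p).1 hpg with h | ⟨i, hi', hiL', hp, hcxi⟩
        · exact Or.inl h
        · exact Or.inr ⟨i, by omega, hiL', hp, hcxi⟩
      · exact Or.inr ⟨i0, by omega, hi, by push_cast; rfl, hcx⟩
    · rintro (h | ⟨i, hi', hiL', hp, hcxi⟩)
      · exact Or.inl ((hg p).2 (Or.inl h))
      · by_cases hii : i = i0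
        · subst hii
          right
          rw [hp]
          push_cast
          rfl
        · exact Or.inl ((hg p).2 (Or.inr ⟨i, by omega, hiL', hp, hcxi⟩))
  · rw [if_neg (fun hc => hcx (hcondIff.1 hc)), hg p]
    unfold MidSpec
    constructor
    · rintro (h | ⟨i, hi', hiL', hp, hcxi⟩)
      · exact Or.inl h
      · exact Or.inr ⟨i, by omega, hiL', hp, hcxi⟩
    · rintro (h | ⟨i, hi', hiL', hp, hcxi⟩)
      · exact Or.inl h
      · by_cases hii : i = i0
        · subst hii
          exact absurd hcxi hcx
        · exact Or.inr ⟨i, by omega, hiL', hp, hcxi⟩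

theorem inner_full {s : List Char} {L : Nat} (hL : 2 ≤ L) (hLn : L ≤ s.length)
    {g : PySem.Set (Int × Int)} (hg : ∀ p, p ∈ g ↔ GoodSpec s (L - 1) p) :
    ∀ p, p ∈ lenB s (s.length : Int) g (L : Int) ↔ GoodSpec s L p := by
  have haux : ∀ (m : Nat), m ≤ s.length - L + 1 →
      ∀ p, p ∈ (PySem.List.pyRange 0 (m : Int) 1).foldl (stepB s (L : Int)) g ↔
        MidSpec s L m p := by
    intro m
    induction m with
    | zero =>
      intro _ p
      rw [show ((0 : Nat) : Int) = (0 : Int) from rfl,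
        PySem.List.pyRange_one_eq_nil (by omega), List.foldl_nil, hg p]
      unfold MidSpec
      constructor
      · exact Or.inl
      · rintro (h | ⟨i, hi', _, _, _⟩)
        · exact h
        · omega
    | succ m ih =>
      intro hm p
      rw [show ((m + 1 : Nat) : Int) = ((m : Int) + 1) from by push_cast; ring,
        PySem.List.pyRange_one_succ_right (by omega), List.foldl_append,
        List.foldl_cons, List.foldl_nil]
      exact inner_step hL (by omega) (fun q => ih (by omega) q) p
  intro p
  unfold lenB
  rw [show ((s.length : Int) - (L : Int) + 1) = ((s.length - L + 1 : Nat) : Int) from by omega,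
    haux (s.length - L + 1) le_rfl p]
  unfold MidSpec GoodSpec
  constructor
  · rintro (⟨i, j, hp, hij, hj, hgap, hcx⟩ | ⟨i, hi', hiL', hp, hcx⟩)
    · exact ⟨i, j, hp, hij, hj, by omega, hcx⟩
    · exact ⟨i, i + L, hp, by omega, hiL', by omega, hcx⟩
  · rintro ⟨i, j, hp, hij, hj, hgap, hcx⟩
    by_cases h : j - i ≤ L - 1
    · exact Or.inl ⟨i, j, hp, hij, hj, h, hcx⟩
    · have hij' : j = i + L := by omega
      subst hij'
      exact Or.inr ⟨i, by omega, by omega, hp, hcx⟩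

theorem good0_spec (s : List Char) :
    ∀ p, p ∈ (PySem.Set.ofList
        ((PySem.List.pyRange 0 ((s.length : Int) + 1) 1).map (fun i => (i, i)))) ↔
      GoodSpec s 1 p := by
  intro p
  rw [PySem.Set.mem_ofList, List.mem_map]
  unfold GoodSpec
  constructor
  · rintro ⟨x, hx, rfl⟩
    rw [PySem.List.mem_pyRange_one] at hx
    refine ⟨x.toNat, x.toNat, by simp [Int.toNat_of_nonneg hx.1], le_rfl, by omega, by omega, ?_⟩
    rw [seg_self]
    exact CanX_nil
  · rintro ⟨i, j, rfl, hij, hj, hgap, hcx⟩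
    by_cases hji : j = i
    · subst hji
      exact ⟨(j : Int), by rw [PySem.List.mem_pyRange_one]; omega, rfl⟩
    · have hj1 : j = i + 1 := by omega
      subst hj1
      rw [seg_cons (by omega) hj, seg_self, CanX_singleton] at hcx
      exact absurd hcx (by simp)

theorem fold_len_aux (s : List Char) : ∀ (M : Nat) (g : PySem.Set (Int × Int)), 1 ≤ M →
    M ≤ s.length → (∀ p, p ∈ g ↔ GoodSpec s 1 p) →
    ∀ p, p ∈ ((PySem.List.pyRange 2 ((M : Int) + 1) 1).foldl (lenB s (s.length : Int)) g) ↔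
      GoodSpec s M p := by
  intro M
  induction M with
  | zero => intro g h; omega
  | succ M ih =>
    intro g h1 hM hg p
    by_cases hM0 : M = 0
    · subst hM0
      have hr : PySem.List.pyRange 2 (((0 + 1 : Nat) : Int) + 1) 1 = [] :=
        PySem.List.pyRange_one_eq_nil (by norm_num)
      rw [hr, List.foldl_nil]
      exact hg p
    · have hcast : ((M + 1 : Nat) : Int) + 1 = ((M : Int) + 1) + 1 := by push_cast; ring
      have hr : PySem.List.pyRange 2 (((M + 1 : Nat) : Int) + 1) 1 =
          PySem.List.pyRange 2 ((M : Int) + 1) 1 ++ [(M : Int) + 1] := by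
        rw [hcast]; exact PySem.List.pyRange_one_succ_right (by omega)
      rw [hr, List.foldl_append, List.foldl_cons, List.foldl_nil,
        show ((M : Int) + 1) = ((M + 1 : Nat) : Int) from by push_cast; ring]
      exact inner_full (by omega) (by omega) (fun q => ih g (by omega) (by omega) hg q) p

theorem fold_len (s : List Char) : ∀ (M : Nat), 1 ≤ M → M ≤ s.length →
    ∀ p, p ∈ ((PySem.List.pyRange 2 ((M : Int) + 1) 1).foldl (lenB s (s.length : Int))
        (PySem.Set.ofList
          ((PySem.List.pyRange 0 ((s.length : Int) + 1) 1).map (fun i => (i, i))))) ↔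
      GoodSpec s M p := by
  intro M h1 hM p
  exact fold_len_aux s M _ h1 hM (good0_spec s) p

theorem alt_contains_iff (s : List Char) :
    (PySem.Set.contains
        ((PySem.List.pyRange 2 ((s.length : Int) + 1) 1).foldl (lenB s (s.length : Int))
          (PySem.Set.ofList
            ((PySem.List.pyRange 0 ((s.length : Int) + 1) 1).map (fun i => (i, i)))))
        (0, (s.length : Int)) = true ↔ CanX s = true) := by
  rw [PySem.Set.contains_iff]
  cases s with
  | nil =>
    refine iff_of_true ?_ CanX_nil
    have hr : PySem.List.pyRange 2 ((([] : List Char).length : Int) + 1) 1 = [] :=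
      PySem.List.pyRange_one_eq_nil (by simp)
    rw [hr, List.foldl_nil]
    exact (good0_spec [] (0, 0)).2 ⟨0, 0, by simp, le_rfl, by simp, by omega, by rw [seg_self]; exact CanX_nil⟩
  | cons a t =>
    have h1 : 1 ≤ (a :: t).length := by simp
    rw [fold_len (a :: t) (a :: t).length h1 le_rfl (0, ((a :: t).length : Int))]
    unfold GoodSpec
    constructor
    · rintro ⟨i, j, hp, hij, hj, hgap, hcx⟩
      simp only [Prod.mk.injEq] at hp
      obtain ⟨hpi, hpj⟩ := hp
      have hi0 : i = 0 := by omega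
      have hjl : j = (a :: t).length := by omega
      subst hi0; subst hjl
      rwa [seg_all] at hcx
    · intro hcx
      exact ⟨0, (a :: t).length, by simp, by omega, le_rfl, by omega, by rwa [seg_all]⟩

theorem runSt_stack_openers : ∀ (w st : List Char), runSt st w = some [] →
    ∀ x ∈ st, x ∈ ['(', '[', '{'] := by
  intro w
  induction w with
  | nil =>
    intro st h
    simp [runSt] at h
    subst h
    simp
  | cons c w' ih =>
    intro st h
    by_cases hc : isCloserB c = true
    · cases st with
      | nil => rw [runSt_cons_close_nil hc] at h; exact absurd h (by simp)
      | cons o st' =>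
        rw [runSt_cons_close_cons hc] at h
        split at h
        · intro x hx
          rcases List.mem_cons.mp hx with rfl | hx'
          · rcases pairOKB_cases (by assumption) with ⟨rfl, _⟩ | ⟨rfl, _⟩ | ⟨rfl, _⟩ <;> decide
          · exact ih st' h x hx'
        · exact absurd h (by simp)
    · rw [runSt_cons_open (by simpa using hc)] at h
      intro x hx
      exact ih (c :: st) h x (List.mem_cons_of_mem c hx)

theorem runSt_chars_six : ∀ (w st : List Char), runSt st w = some [] →
    ∀ c ∈ w, c ∈ ['(', ')', '[', ']', '{', '}'] := by
  intro w
  induction w with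
  | nil => intro st _ c hc; exact absurd hc (by simp)
  | cons c w' ih =>
    intro st h x hx
    by_cases hc : isCloserB c = true
    · cases st with
      | nil => rw [runSt_cons_close_nil hc] at h; exact absurd h (by simp)
      | cons o st' =>
        rw [runSt_cons_close_cons hc] at h
        split at h
        · rcases List.mem_cons.mp hx with rfl | hx'
          · simp [isCloserB] at hc
            rcases hc with (rfl | rfl) | rfl <;> decide
          · exact ih st' h x hx'
        · exact absurd h (by simp)
    · rw [runSt_cons_open (by simpa using hc)] at h
      rcases List.mem_cons.mp hx with hxe | hx'
      · subst hxe
        have hop := runSt_stack_openers w' (x :: st) h x (by simp)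
        simp at hop ⊢
        tauto
      · exact ih (c :: st) h x hx'

theorem choice_chars {s w : List Char} (h : Choice s w)
    (hw : ∀ c ∈ w, c ∈ ['(', ')', '[', ']', '{', '}']) :
    ∀ c ∈ s, c ∈ ['(', ')', '[', ']', '{', '}', 'X'] := by
  induction h with
  | nil => intro c hc; exact absurd hc (by simp)
  | @keep c0 s0 w0 hne _ ih =>
    intro c hc
    rcases List.mem_cons.mp hc with hce | hc'
    · subst hce
      have h6 := hw c (by simp)
      simp at h6 ⊢
      tauto
    · exact ih (fun d hd => hw d (List.mem_cons_of_mem _ hd)) c hc'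
  | @wild c0 s0 w0 _ _ ih =>
    intro c hc
    rcases List.mem_cons.mp hc with hce | hc'
    · subst hce
      decide
    · exact ih (fun d hd => hw d (List.mem_cons_of_mem _ hd)) c hc'

-- ===== VERDICT (by name: the statement is the Claim_ definition above) =====
theorem ifPossible_spec : Claim_equal_ifPossible := by
  intro e _
  unfold Spec_ifPossible
  have hA : dfsA e.toList [] = true ↔ CanX e.toList = true := by
    rw [dfsA_iff]
    constructor
    · rintro ⟨w, hc, hv⟩
      exact (CanX_iff e.toList.length e.toList le_rfl).2
        ⟨w, hc, (isValidGo_eq_run w []).1 (by simpa [isValidA] using hv)⟩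
    · intro h
      obtain ⟨w, hc, hr⟩ := (CanX_iff e.toList.length e.toList le_rfl).1 h
      exact ⟨w, hc, by simpa [isValidA] using (isValidGo_eq_run w []).2 hr⟩
  have hB := alt_contains_iff e.toList
  simp only [ifPossible, ifPossible_alt]
  by_cases hj : e.toList.any
      (fun c => !(['(', ')', '[', ']', '{', '}', 'X'].contains c)) = true
  · rw [if_pos hj]
    have hfalse : dfsA e.toList [] ≠ true := by
      intro h
      obtain ⟨w, hc, hr⟩ := (CanX_iff e.toList.length e.toList le_rfl).1 (hA.1 h)
      obtain ⟨c, hcm, hcj⟩ := List.any_eq_true.mp hj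
      have h7 := choice_chars hc (runSt_chars_six w [] hr) c hcm
      simp at hcj h7
      tauto
    rw [if_neg hfalse]
  · rw [if_neg hj]
    by_cases h : dfsA e.toList [] = true
    · rw [if_pos h, if_pos (hB.2 (hA.1 h))]
    · rw [if_neg h, if_neg (fun hc => h (hA.2 (hB.1 hc)))]
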